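-- pv_equiv track=rewrite | github.com/QHuuT/gonogo | tools/import_real_github_data.py | get_priority_from_labels
-- ===== SOURCE A (Python) =====
-- from typing import Any, Dict, List, Optional
--
-- def get_priority_from_labels(labels: List[Dict]) -> str:
--     """Extract priority from labels."""
--     label_names = [label.get("name", "").lower() for label in labels]
--
--     if any("priority/critical" in label for label in label_names):
--         return "critical"
--     elif any("priority/high" in label for label in label_names):
--         return "high"
--     elif any("priority/medium" in label for label in label_names):
--         return "medium"
--     elif any("priority/low" in label for label in label_names):
--         return "low"
--     else:
--         return "medium"  # default
-- ===== SOURCE B (Python) =====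
-- _KEYS = ("priority/critical", "priority/high", "priority/medium", "priority/low")
-- _NAMES = ("critical", "high", "medium", "low", "medium")
--
--
-- def _rank(name):
--     for i, k in enumerate(_KEYS):
--         if k in name:
--             return i
--     return len(_KEYS)
--
--
-- def get_priority_from_labels(labels):
--     best = len(_KEYS)
--     for label in labels:
--         r = _rank(label.get("name", "").lower())
--         if r < best:
--             best = r
--     return _NAMES[best]
-- ===== Notes on version B (the rewrite author's own statement) =====
-- stated objective: alternative
-- what changed: Replaces A's four separate any() scans over the label list with a single pass that maintains a running best priority rank (index of the first keyword found in each name) and translates the final rank through a table, defaulting to 'medium'.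
import Mathlib
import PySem

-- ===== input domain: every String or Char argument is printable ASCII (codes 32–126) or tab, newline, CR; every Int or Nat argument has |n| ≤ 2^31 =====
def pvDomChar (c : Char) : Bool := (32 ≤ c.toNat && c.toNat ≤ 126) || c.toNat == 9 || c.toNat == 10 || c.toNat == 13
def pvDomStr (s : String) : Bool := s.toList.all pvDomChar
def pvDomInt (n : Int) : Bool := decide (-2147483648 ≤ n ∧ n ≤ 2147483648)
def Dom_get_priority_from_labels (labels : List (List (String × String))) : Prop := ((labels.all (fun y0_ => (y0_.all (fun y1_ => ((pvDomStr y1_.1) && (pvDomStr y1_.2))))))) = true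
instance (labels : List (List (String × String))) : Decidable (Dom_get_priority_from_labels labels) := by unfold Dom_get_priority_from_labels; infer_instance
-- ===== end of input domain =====

-- B replaces A's four separate any() scans by one pass keeping a running best rank; objective: alternative decomposition (same cost class).

-- ===== PORT A =====
def get_priority_from_labels (labels : List (List (String × String))) : String :=
  let label_names := labels.map (fun label =>
    PySem.Str.lower (PySem.Dict.getD (PySem.Dict.mk label) "name" ""))
  if label_names.any (fun l => PySem.Str.isIn "priority/critical" l) then "critical"
  else if label_names.any (fun l => PySem.Str.isIn "priority/high" l) then "high"
  else if label_names.any (fun l => PySem.Str.isIn "priority/medium" l) then "medium"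
  else if label_names.any (fun l => PySem.Str.isIn "priority/low" l) then "low"
  else "medium"

-- ===== PORT B =====
def pvKeys : List String := ["priority/critical", "priority/high", "priority/medium", "priority/low"]
def pvNames : List String := ["critical", "high", "medium", "low", "medium"]

-- Source B's _rank: scan the keys in order, return the index of the first key contained in name
def pvRankAux (name : String) : List String → Nat → Nat
  | [], i => i
  | k :: rest, i => if PySem.Str.isIn k name then i else pvRankAux name rest (i + 1)

def pvRank (name : String) : Nat := pvRankAux name pvKeys 0

def get_priority_from_labels_alt (labels : List (List (String × String))) : String :=
  let best := labels.foldl (fun best label =>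
    let r := pvRank (PySem.Str.lower (PySem.Dict.getD (PySem.Dict.mk label) "name" ""))
    if r < best then r else best) pvKeys.length
  pvNames.getD best "medium"

-- ===== PRECONDITION & SPEC =====
def Spec_get_priority_from_labels (labels : List (List (String × String))) (out : String) : Prop := out = get_priority_from_labels_alt labels
instance (labels : List (List (String × String))) (out : String) : Decidable (Spec_get_priority_from_labels labels out) := by unfold Spec_get_priority_from_labels; infer_instance

-- ===== CLAIM (what is proved, stated in full; the proofs are below) =====
def Claim_equal_get_priority_from_labels : Prop := ∀ (labels : List (List (String × String))), Dom_get_priority_from_labels labels → Spec_get_priority_from_labels labels (get_priority_from_labels labels)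

-- ===== LEMMAS AND PROOFS =====

-- the name extracted from one label, shared by both ports
def pvName (label : List (String × String)) : String :=
  PySem.Str.lower (PySem.Dict.getD (PySem.Dict.mk label) "name" "")

-- rank characterisation: pvRank name ≤ k iff one of the first k+1 keys occurs in name
lemma pvRank_le_zero_iff (name : String) :
    pvRank name = 0 ↔ PySem.Str.isIn "priority/critical" name = true := by
  simp only [pvRank, pvKeys, pvRankAux]
  split_ifs <;> simp_all

lemma pvRank_le_one_iff (name : String) :
    pvRank name ≤ 1 ↔ (PySem.Str.isIn "priority/critical" name = true ∨
      PySem.Str.isIn "priority/high" name = true) := by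
  simp only [pvRank, pvKeys, pvRankAux]
  split_ifs <;> simp_all

lemma pvRank_le_two_iff (name : String) :
    pvRank name ≤ 2 ↔ (PySem.Str.isIn "priority/critical" name = true ∨
      PySem.Str.isIn "priority/high" name = true ∨
      PySem.Str.isIn "priority/medium" name = true) := by
  simp only [pvRank, pvKeys, pvRankAux]
  split_ifs <;> simp_all

lemma pvRank_le_three_iff (name : String) :
    pvRank name ≤ 3 ↔ (PySem.Str.isIn "priority/critical" name = true ∨
      PySem.Str.isIn "priority/high" name = true ∨
      PySem.Str.isIn "priority/medium" name = true ∨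
      PySem.Str.isIn "priority/low" name = true) := by
  simp only [pvRank, pvKeys, pvRankAux]
  split_ifs <;> simp_all

-- the fold in B's port, named
def pvBest (labels : List (List (String × String))) (a : Nat) : Nat :=
  labels.foldl (fun best label =>
    let r := pvRank (pvName label)
    if r < best then r else best) a

lemma pvBest_le_iff (labels : List (List (String × String))) (a k : Nat) :
    pvBest labels a ≤ k ↔ a ≤ k ∨ ∃ l ∈ labels, pvRank (pvName l) ≤ k := by
  induction labels generalizing a with
  | nil => simp [pvBest]
  | cons x xs ih =>
    simp only [pvBest, List.foldl_cons] at *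
    rw [ih]
    constructor
    · rintro (h | h)
      · split_ifs at h with hr
        · exact Or.inr ⟨x, by simp, by omega⟩
        · exact Or.inl h
      · obtain ⟨l, hl, hle⟩ := h
        exact Or.inr ⟨l, by simp [hl], hle⟩
    · rintro (h | ⟨l, hl, hle⟩)
      · left; split_ifs <;> omega
      · rcases List.mem_cons.mp hl with rfl | hl'
        · left; split_ifs <;> omega
        · exact Or.inr ⟨l, hl', hle⟩

lemma pvBest_sharp (labels : List (List (String × String))) (k : Nat) (hk : k < 4) :
    pvBest labels 4 ≤ k ↔ ∃ l ∈ labels, pvRank (pvName l) ≤ k := by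
  rw [pvBest_le_iff]
  constructor
  · rintro (h | h)
    · omega
    · exact h
  · exact Or.inr

lemma pvBest_le_init (labels : List (List (String × String))) :
    pvBest labels 4 ≤ 4 := by
  rw [pvBest_le_iff]; left; omega


lemma pvName_def :
    (fun label => PySem.Str.lower (PySem.Dict.getD (PySem.Dict.mk label) "name" "")) = pvName := rfl

-- ===== VERDICT (by name: the statement is the Claim_ definition above) =====
theorem get_priority_from_labels_spec : Claim_equal_get_priority_from_labels := by
  intro labels _
  show get_priority_from_labels labels = get_priority_from_labels_alt labels
  have hA : get_priority_from_labels labels =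
      (if labels.any (fun l => PySem.Str.isIn "priority/critical" (pvName l)) then "critical"
       else if labels.any (fun l => PySem.Str.isIn "priority/high" (pvName l)) then "high"
       else if labels.any (fun l => PySem.Str.isIn "priority/medium" (pvName l)) then "medium"
       else if labels.any (fun l => PySem.Str.isIn "priority/low" (pvName l)) then "low"
       else "medium") := by
    simp only [get_priority_from_labels, List.any_map, Function.comp_def, pvName_def]
  have hB : get_priority_from_labels_alt labels = pvNames.getD (pvBest labels 4) "medium" := rfl
  rw [hA, hB]
  have hb4 := pvBest_le_init labels
  simp only [List.any_eq_true]
  by_cases h0 : ∃ l ∈ labels, PySem.Str.isIn "priority/critical" (pvName l) = true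
  · have hb : pvBest labels 4 = 0 := by
      obtain ⟨l, hl, h⟩ := h0
      have := (pvBest_sharp labels 0 (by omega)).mpr
        ⟨l, hl, Nat.le_of_eq ((pvRank_le_zero_iff _).mpr h)⟩
      omega
    rw [if_pos h0, hb]; rfl
  · by_cases h1 : ∃ l ∈ labels, PySem.Str.isIn "priority/high" (pvName l) = true
    · have hup : pvBest labels 4 ≤ 1 := by
        obtain ⟨l, hl, h⟩ := h1
        exact (pvBest_sharp labels 1 (by omega)).mpr ⟨l, hl, (pvRank_le_one_iff _).mpr (Or.inr h)⟩
      have hlo : ¬ pvBest labels 4 ≤ 0 := by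
        intro hle
        obtain ⟨l, hl, h⟩ := (pvBest_sharp labels 0 (by omega)).mp hle
        exact h0 ⟨l, hl, (pvRank_le_zero_iff _).mp (by omega)⟩
      have hb : pvBest labels 4 = 1 := by omega
      rw [if_neg h0, if_pos h1, hb]; rfl
    · by_cases h2 : ∃ l ∈ labels, PySem.Str.isIn "priority/medium" (pvName l) = true
      · have hup : pvBest labels 4 ≤ 2 := by
          obtain ⟨l, hl, h⟩ := h2
          exact (pvBest_sharp labels 2 (by omega)).mpr
            ⟨l, hl, (pvRank_le_two_iff _).mpr (Or.inr (Or.inr h))⟩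
        have hlo : ¬ pvBest labels 4 ≤ 1 := by
          intro hle
          obtain ⟨l, hl, h⟩ := (pvBest_sharp labels 1 (by omega)).mp hle
          rcases (pvRank_le_one_iff _).mp h with h | h
          · exact h0 ⟨l, hl, h⟩
          · exact h1 ⟨l, hl, h⟩
        have hb : pvBest labels 4 = 2 := by omega
        rw [if_neg h0, if_neg h1, if_pos h2, hb]; rfl
      · by_cases h3 : ∃ l ∈ labels, PySem.Str.isIn "priority/low" (pvName l) = true
        · have hup : pvBest labels 4 ≤ 3 := by
            obtain ⟨l, hl, h⟩ := h3
            exact (pvBest_sharp labels 3 (by omega)).mpr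
              ⟨l, hl, (pvRank_le_three_iff _).mpr (Or.inr (Or.inr (Or.inr h)))⟩
          have hlo : ¬ pvBest labels 4 ≤ 2 := by
            intro hle
            obtain ⟨l, hl, h⟩ := (pvBest_sharp labels 2 (by omega)).mp hle
            rcases (pvRank_le_two_iff _).mp h with h | h | h
            · exact h0 ⟨l, hl, h⟩
            · exact h1 ⟨l, hl, h⟩
            · exact h2 ⟨l, hl, h⟩
          have hb : pvBest labels 4 = 3 := by omega
          rw [if_neg h0, if_neg h1, if_neg h2, if_pos h3, hb]; rfl
        · have hlo : ¬ pvBest labels 4 ≤ 3 := by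
            intro hle
            obtain ⟨l, hl, h⟩ := (pvBest_sharp labels 3 (by omega)).mp hle
            rcases (pvRank_le_three_iff _).mp h with h | h | h | h
            · exact h0 ⟨l, hl, h⟩
            · exact h1 ⟨l, hl, h⟩
            · exact h2 ⟨l, hl, h⟩
            · exact h3 ⟨l, hl, h⟩
          have hb : pvBest labels 4 = 4 := by omega
          rw [if_neg h0, if_neg h1, if_neg h2, if_neg h3, hb]; rfl
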